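-- pv_equiv track=rewrite | github.com/AdamAmar26/IDS-Project | backend/app/mitre/mapper.py | _determine_kill_chain_phase
-- ===== SOURCE A (Python) =====
-- TACTIC_DB: dict[str, str] = {
--     "TA0001": "Initial Access",
--     "TA0002": "Execution",
--     "TA0003": "Persistence",
--     "TA0004": "Privilege Escalation",
--     "TA0005": "Defense Evasion",
--     "TA0006": "Credential Access",
--     "TA0007": "Discovery",
--     "TA0008": "Lateral Movement",
--     "TA0009": "Collection",
--     "TA0010": "Exfiltration",
--     "TA0011": "Command and Control",
--     "TA0040": "Impact",
-- }
--
-- KILL_CHAIN_ORDER = [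
--     "TA0001", "TA0002", "TA0003", "TA0004", "TA0005",
--     "TA0006", "TA0007", "TA0008", "TA0009", "TA0010",
--     "TA0011", "TA0040",
-- ]
--
-- def _determine_kill_chain_phase(tactic_ids: set[str]) -> str:
--     """Return the furthest-progressed kill-chain stage observed."""
--     furthest = None
--     for tid in KILL_CHAIN_ORDER:
--         if tid in tactic_ids:
--             furthest = tid
--     if furthest:
--         return f"{furthest} ({TACTIC_DB.get(furthest, furthest)})"
--     return "unknown"
-- ===== SOURCE B (Python) =====
-- # B: index the kill chain once and take an argmax over the input, instead of
-- # scanning the fixed ordered list and remembering the last match.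
-- TACTIC_DB: dict[str, str] = {
--     "TA0001": "Initial Access",
--     "TA0002": "Execution",
--     "TA0003": "Persistence",
--     "TA0004": "Privilege Escalation",
--     "TA0005": "Defense Evasion",
--     "TA0006": "Credential Access",
--     "TA0007": "Discovery",
--     "TA0008": "Lateral Movement",
--     "TA0009": "Collection",
--     "TA0010": "Exfiltration",
--     "TA0011": "Command and Control",
--     "TA0040": "Impact",
-- }
--
-- KILL_CHAIN_ORDER = [
--     "TA0001", "TA0002", "TA0003", "TA0004", "TA0005",
--     "TA0006", "TA0007", "TA0008", "TA0009", "TA0010",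
--     "TA0011", "TA0040",
-- ]
--
-- POSITION = {tid: i for i, tid in enumerate(KILL_CHAIN_ORDER)}
--
-- def _determine_kill_chain_phase(tactic_ids: set[str]) -> str:
--     candidates = [t for t in tactic_ids if t in POSITION]
--     if not candidates:
--         return "unknown"
--     furthest = max(candidates, key=POSITION.__getitem__)
--     return f"{furthest} ({TACTIC_DB.get(furthest, furthest)})"
-- ===== Notes on version B (the rewrite author's own statement) =====
-- stated objective: idiomatic
-- what changed: B precomputes a tactic-id -> index map, filters the input to known tactics and picks the argmax by index, instead of A's scan over the fixed ordered list remembering the last member of the input.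
import Mathlib
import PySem

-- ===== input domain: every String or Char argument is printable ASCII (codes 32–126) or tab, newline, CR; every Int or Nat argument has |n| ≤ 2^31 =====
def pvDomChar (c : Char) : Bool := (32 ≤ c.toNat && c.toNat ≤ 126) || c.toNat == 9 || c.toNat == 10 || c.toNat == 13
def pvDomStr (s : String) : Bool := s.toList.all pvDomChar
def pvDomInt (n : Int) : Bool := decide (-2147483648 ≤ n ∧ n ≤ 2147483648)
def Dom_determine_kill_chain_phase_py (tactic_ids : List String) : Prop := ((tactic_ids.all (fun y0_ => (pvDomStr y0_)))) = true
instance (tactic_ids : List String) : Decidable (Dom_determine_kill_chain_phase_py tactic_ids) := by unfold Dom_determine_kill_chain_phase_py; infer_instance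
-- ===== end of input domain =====

-- B replaces A's scan of the fixed kill-chain list (remembering the last member of the input)
-- by an index map over the kill chain and an argmax over the input; return values are proved equal.
-- The Python argument is a set; it is modelled as the list of its distinct elements, and both
-- ports (membership test / filter+argmax with an injective key) are order-independent.

-- ===== PORT A =====
def pvTacticDB : PySem.Dict String String := PySem.Dict.ofList
  [("TA0001", "Initial Access"), ("TA0002", "Execution"), ("TA0003", "Persistence"),
   ("TA0004", "Privilege Escalation"), ("TA0005", "Defense Evasion"), ("TA0006", "Credential Access"),
   ("TA0007", "Discovery"), ("TA0008", "Lateral Movement"), ("TA0009", "Collection"),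
   ("TA0010", "Exfiltration"), ("TA0011", "Command and Control"), ("TA0040", "Impact")]

def pvKillChainOrder : List String :=
  ["TA0001", "TA0002", "TA0003", "TA0004", "TA0005",
   "TA0006", "TA0007", "TA0008", "TA0009", "TA0010",
   "TA0011", "TA0040"]

def determine_kill_chain_phase_py (tactic_ids : List String) : String :=
  -- for tid in KILL_CHAIN_ORDER: if tid in tactic_ids: furthest = tid
  let furthest := pvKillChainOrder.foldl
    (fun acc tid => if tid ∈ tactic_ids then some tid else acc) (none : Option String)
  -- `if furthest:` — every kill-chain id is a nonempty literal, so truthiness is exactly isSome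
  match furthest with
  | some f => f ++ " (" ++ pvTacticDB.getD f f ++ ")"
  | none => "unknown"

-- ===== PORT B =====
-- POSITION = {tid: i for i, tid in enumerate(KILL_CHAIN_ORDER)}
def pvPosition : PySem.Dict String Int :=
  (PySem.List.enumerate pvKillChainOrder).foldl (fun d p => d.insert p.2 p.1) PySem.Dict.empty

def determine_kill_chain_phase_py_alt (tactic_ids : List String) : String :=
  let candidates := tactic_ids.filter (fun t => (pvPosition.get? t).isSome)
  -- max(candidates, key=POSITION.__getitem__); the key is only applied to candidates,
  -- which are all in POSITION, so `.getD 0` never supplies the default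
  match PySem.List.max? candidates (fun t => (pvPosition.get? t).getD 0) with
  | none => "unknown"
  | some f => f ++ " (" ++ pvTacticDB.getD f f ++ ")"

-- ===== PRECONDITION & SPEC =====
def Spec_determine_kill_chain_phase_py (tactic_ids : List String) (out : String) : Prop := out = determine_kill_chain_phase_py_alt tactic_ids
instance (tactic_ids : List String) (out : String) : Decidable (Spec_determine_kill_chain_phase_py tactic_ids out) := by unfold Spec_determine_kill_chain_phase_py; infer_instance

-- ===== CLAIM (what is proved, stated in full; the proofs are below) =====
def Claim_equal_determine_kill_chain_phase_py : Prop := ∀ (tactic_ids : List String), Dom_determine_kill_chain_phase_py tactic_ids → Spec_determine_kill_chain_phase_py tactic_ids (determine_kill_chain_phase_py tactic_ids)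

-- ===== LEMMAS AND PROOFS =====

-- A's last-match loop is find-first on the reversed list.
theorem foldl_lastmatch (s : List String) (L : List String) (acc : Option String) :
    L.foldl (fun a t => if t ∈ s then some t else a) acc
      = (L.reverse.find? (fun t => decide (t ∈ s))).orElse (fun _ => acc) := by
  induction L generalizing acc with
  | nil => simp
  | cons a L ih =>
    rw [List.foldl_cons, ih, List.reverse_cons, List.find?_append]
    rcases h : L.reverse.find? (fun t => decide (t ∈ s)) with _ | x
    · by_cases ha : a ∈ s <;> simp [Option.orElse, ha]
    · simp [Option.orElse]

-- in a list whose key values decrease, the first hit of find? has the largest key among all hits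
theorem find?_key_max {α κ : Type} [LinearOrder κ] (key : α → κ) (q : α → Bool) :
    ∀ (L : List α) (r : α), L.Pairwise (fun a b => key b ≤ key a) → L.find? q = some r →
      ∀ y ∈ L, q y = true → key y ≤ key r := by
  intro L
  induction L with
  | nil => intro r _ h; simp at h
  | cons a L ih =>
    intro r hp hf y hy hq
    rw [List.pairwise_cons] at hp
    rw [List.find?_cons] at hf
    by_cases ha : q a
    · simp [ha] at hf
      subst hf
      rcases List.mem_cons.mp hy with hy | hy
      · subst hy; exact le_refl _
      · exact hp.1 y hy
    · simp [ha] at hf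
      rcases List.mem_cons.mp hy with hy | hy
      · subst hy; simp [hq] at ha
      · exact ih r hp.2 hf y hy hq

-- POSITION's keys are exactly the kill-chain order
theorem keys_pos : pvPosition.keys = pvKillChainOrder := by decide

theorem isSome_pos (t : String) : (pvPosition.get? t).isSome ↔ t ∈ pvKillChainOrder := by
  rw [← keys_pos, ← PySem.Dict.contains_iff_mem_keys]
  rcases h : pvPosition.get? t with _ | v
  · rw [PySem.Dict.get?_eq_none_iff_contains] at h
    simp [h]
  · have : pvPosition.contains t = true := by
      by_contra hc
      simp at hc
      rw [← PySem.Dict.get?_eq_none_iff_contains] at hc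
      simp [hc] at h
    simp [this]

-- along the reversed kill chain the POSITION values decrease
theorem hpair : pvKillChainOrder.reverse.Pairwise
    (fun a b => (pvPosition.get? b).getD 0 ≤ (pvPosition.get? a).getD 0) := by decide

-- POSITION is injective on the kill-chain ids
theorem hinj : ∀ y ∈ pvKillChainOrder, ∀ z ∈ pvKillChainOrder,
    (pvPosition.get? y).getD 0 = (pvPosition.get? z).getD 0 → y = z := by decide

theorem ab_agree (s : List String) :
    determine_kill_chain_phase_py s = determine_kill_chain_phase_py_alt s := by
  unfold determine_kill_chain_phase_py determine_kill_chain_phase_py_alt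
  rw [foldl_lastmatch]
  rcases h : pvKillChainOrder.reverse.find? (fun t => decide (t ∈ s)) with _ | r
  · have hcand : s.filter (fun t => (pvPosition.get? t).isSome) = [] := by
      rw [List.filter_eq_nil_iff]
      intro a ha hp
      have hmem := (isSome_pos a).mp (by simpa using hp)
      have := List.find?_eq_none.mp h a (List.mem_reverse.mpr hmem)
      simp [ha] at this
    simp only [hcand]
    have : PySem.List.max? ([] : List String) (fun t => (pvPosition.get? t).getD 0) = none := by
      rw [PySem.List.max?_eq_none_iff]
    simp [Option.orElse, this]
  · have hrmem : r ∈ pvKillChainOrder := List.mem_reverse.mp (List.mem_of_find?_eq_some h)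
    have hrs : r ∈ s := by simpa using List.find?_some h
    have hrc : r ∈ s.filter (fun t => (pvPosition.get? t).isSome) :=
      List.mem_filter.mpr ⟨hrs, by simp [isSome_pos, hrmem]⟩
    rcases hm : PySem.List.max? (s.filter (fun t => (pvPosition.get? t).isSome))
        (fun t => (pvPosition.get? t).getD 0) with _ | m
    · rw [PySem.List.max?_eq_none_iff] at hm
      rw [hm] at hrc; simp at hrc
    · have hmc : m ∈ s.filter (fun t => (pvPosition.get? t).isSome) := PySem.List.max?_mem hm
      have hmL : m ∈ pvKillChainOrder := (isSome_pos m).mp (by simpa using (List.mem_filter.mp hmc).2)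
      have h1 : (pvPosition.get? r).getD 0 ≤ (pvPosition.get? m).getD 0 :=
        PySem.List.max?_isMax hm r hrc
      have h2 : (pvPosition.get? m).getD 0 ≤ (pvPosition.get? r).getD 0 :=
        find?_key_max (fun t => (pvPosition.get? t).getD 0) (fun t => decide (t ∈ s))
          pvKillChainOrder.reverse r hpair h m (List.mem_reverse.mpr hmL)
          (by simpa using (List.mem_filter.mp hmc).1)
      have : m = r := hinj m hmL r hrmem (le_antisymm h2 h1)
      simp [Option.orElse, hm, this]

-- ===== VERDICT (by name: the statement is the Claim_ definition above) =====
theorem determine_kill_chain_phase_py_spec : Claim_equal_determine_kill_chain_phase_py := by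
  intro s _
  exact ab_agree s
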